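-- pv_equiv track=rewrite | github.com/lsst-camera-dh/EO-utilities | python/lsst/eo_utils/flat/nonlinearity.py | build_slitw_format_dict
-- ===== SOURCE A (Python) =====
-- def build_slitw_format_dict(slitw_vals):
--     """Build a dict mapping the slit width vals to matplotlib format statements"""
--     idx = 0
--     odict = {}
--     slit_fmt_list = ['r.', 'g.', 'b.', 'k.']
--     n_slit_fmt = len(slit_fmt_list)
--     for slitw in slitw_vals:
--         if slitw not in odict:
--             odict[slitw] = slit_fmt_list[idx % n_slit_fmt]
--             idx += 1
--     return odict
-- ===== SOURCE B (Python) =====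
-- def build_slitw_format_dict(slitw_vals):
--     """Build a dict mapping the slit width vals to matplotlib format statements"""
--     slit_fmt_list = ['r.', 'g.', 'b.', 'k.']
--     # Phase 1: backward overwrite pass leaves, for each value, its FIRST index.
--     first_idx = {}
--     for i in range(len(slitw_vals) - 1, -1, -1):
--         first_idx[slitw_vals[i]] = i
--     # Phase 2: sort the distinct values by first-occurrence index.
--     order = sorted(first_idx, key=first_idx.get)
--     # Phase 3: positional map onto the cycling format strings.
--     return {v: slit_fmt_list[k % len(slit_fmt_list)] for k, v in enumerate(order)}
-- ===== Notes on version B (the rewrite author's own statement) =====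
-- stated objective: alternative
-- what changed: Replaces A's single forward pass with a seen-dict and running counter by a sort-based algorithm: a backward overwrite pass records each value's first index, the distinct values are sorted by that index, then mapped positionally onto the cycling format strings.
import Mathlib
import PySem

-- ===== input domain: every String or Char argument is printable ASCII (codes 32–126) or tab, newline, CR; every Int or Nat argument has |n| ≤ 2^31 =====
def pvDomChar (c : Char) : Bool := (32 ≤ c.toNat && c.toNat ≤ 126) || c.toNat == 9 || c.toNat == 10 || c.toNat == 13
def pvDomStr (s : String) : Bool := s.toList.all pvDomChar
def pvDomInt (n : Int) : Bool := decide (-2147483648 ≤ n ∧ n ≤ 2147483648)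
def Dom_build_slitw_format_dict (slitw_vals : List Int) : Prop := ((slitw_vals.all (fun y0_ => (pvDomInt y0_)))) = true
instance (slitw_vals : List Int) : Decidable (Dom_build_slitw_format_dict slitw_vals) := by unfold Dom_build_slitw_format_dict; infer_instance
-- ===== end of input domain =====

-- B replaces A's single forward pass with a seen-dict and running counter by a sort-based
-- algorithm: a backward overwrite pass computes each value's first index, the distinct values
-- are sorted by that index, then mapped positionally onto the cycling formats; objective: alternative.


-- ===== PORT A =====
-- slit_fmt_list = ['r.', 'g.', 'b.', 'k.']
def slitFmtList : List String := ["r.", "g.", "b.", "k."]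

def build_slitw_format_dict (slitw_vals : List Int) : List (Int × String) :=
  (slitw_vals.foldl
    (fun st slitw =>
      if st.2.contains slitw then st
      else (st.1 + 1,
            st.2.insert slitw
              (PySem.List.pyGetD slitFmtList (PySem.Int.mod st.1 (slitFmtList.length : Int)) "")))
    ((0 : Int), PySem.Dict.empty)).2.items

-- ===== PORT B =====
-- for i in range(len-1, -1, -1): first_idx[vals[i]] = i   (backward overwrite pass)
-- slitw_vals[i] with i always in range: pyGetD's default 0 is never used (exact)
-- sorted(first_idx, key=first_idx.get): every key is present, so .get is .getD with unused default (exact)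
def build_slitw_format_dict_alt (slitw_vals : List Int) : List (Int × String) :=
  let first_idx : PySem.Dict Int Int :=
    (PySem.List.pyRange ((slitw_vals.length : Int) - 1) (-1) (-1)).foldl
      (fun d i => d.insert (PySem.List.pyGetD slitw_vals i 0) i) PySem.Dict.empty
  let order : List Int :=
    PySem.List.sorted first_idx.keys (fun k => first_idx.getD k 0) false
  (PySem.List.enumerate order).map
    (fun p => (p.2, PySem.List.pyGetD slitFmtList (PySem.Int.mod p.1 (slitFmtList.length : Int)) ""))

-- ===== PRECONDITION & SPEC =====
def Spec_build_slitw_format_dict (slitw_vals : List Int) (out : List (Int × String)) : Prop := out = build_slitw_format_dict_alt slitw_vals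
instance (slitw_vals : List Int) (out : List (Int × String)) : Decidable (Spec_build_slitw_format_dict slitw_vals out) := by unfold Spec_build_slitw_format_dict; infer_instance

-- ===== CLAIM (what is proved, stated in full; the proofs are below) =====
def Claim_equal_build_slitw_format_dict : Prop := ∀ (slitw_vals : List Int), Dom_build_slitw_format_dict slitw_vals → Spec_build_slitw_format_dict slitw_vals (build_slitw_format_dict slitw_vals)

-- ===== LEMMAS AND PROOFS =====
def pvFmt (i : Int) : String :=
  PySem.List.pyGetD slitFmtList (PySem.Int.mod i (slitFmtList.length : Int)) ""

def pvDictOf (u : List Int) : PySem.Dict Int String :=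
  PySem.Dict.mk ((PySem.List.enumerate u).map (fun p => (p.2, pvFmt p.1)))

theorem pvDictOf_keys (u : List Int) : (pvDictOf u).keys = u := by
  simp [pvDictOf, PySem.Dict.keys, Function.comp_def, PySem.List.map_snd_enumerate]

theorem pvDictOf_contains (u : List Int) (x : Int) :
    (pvDictOf u).contains x = decide (x ∈ u) := by
  rw [PySem.Dict.contains_eq_decide_mem_keys, pvDictOf_keys]

theorem pvDictOf_snoc (u : List Int) (x : Int) (hx : x ∉ u) :
    (pvDictOf u).insert x (pvFmt (u.length : Int)) = pvDictOf (u ++ [x]) := by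
  apply PySem.Dict.ext
  rw [PySem.Dict.items_insert_of_not_contains]
  · simp [pvDictOf, PySem.List.enumerate_append,
      PySem.List.enumerate_cons, PySem.List.enumerate_nil]
  · rw [pvDictOf_contains]; simp [hx]

theorem pvLoop (xs u : List Int) (hu : u.Nodup) :
    xs.foldl
      (fun st slitw =>
        if st.2.contains slitw then st
        else (st.1 + 1,
              st.2.insert slitw
                (PySem.List.pyGetD slitFmtList (PySem.Int.mod st.1 (slitFmtList.length : Int)) "")))
      ((u.length : Int), pvDictOf u)
    = (((PySem.Set.update u xs).length : Int), pvDictOf (PySem.Set.update u xs)) := by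
  induction xs generalizing u with
  | nil => simp [PySem.Set.update]
  | cons x xs ih =>
    rw [List.foldl_cons, PySem.Set.update_cons]
    by_cases hx : x ∈ u
    · rw [PySem.Set.add_of_mem hx]
      simpa [pvDictOf_contains, hx] using ih u hu
    · have h1 : (pvDictOf u).contains x = decide (x ∈ u) := pvDictOf_contains u x
      simp only [h1, hx, decide_false, Bool.false_eq_true, if_false]
      rw [PySem.Set.add_of_not_mem hx]
      have hnd : (u ++ [x]).Nodup := by
        refine List.Nodup.append hu (List.nodup_singleton x) ?_
        simpa [List.disjoint_singleton] using hx
      have key := ih (u ++ [x]) hnd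
      rw [show (PySem.List.pyGetD slitFmtList (PySem.Int.mod ((u.length : Int)) (slitFmtList.length : Int)) "") = pvFmt (u.length : Int) from rfl,
          pvDictOf_snoc u x hx]
      have hcast : (u.length : Int) + 1 = (((u ++ [x]).length : Nat) : Int) := by
        simp [List.length_append]
      rw [hcast]
      exact key

-- A's result, characterised: enumerate the first-seen distinct values and map to formats
theorem pvA_eq (xs : List Int) :
    build_slitw_format_dict xs
      = (PySem.List.enumerate (PySem.List.dedup xs)).map (fun p => (p.2, pvFmt p.1)) := by
  unfold build_slitw_format_dict
  have h0 : (PySem.Dict.empty : PySem.Dict Int String) = pvDictOf [] := by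
    simp [pvDictOf, PySem.Dict.empty, PySem.List.enumerate_nil]
  have : ((0 : Int), (PySem.Dict.empty : PySem.Dict Int String))
      = (((([] : List Int).length : Int)), pvDictOf []) := by simp [h0]
  rw [this, pvLoop xs [] List.nodup_nil]
  simp [pvDictOf, PySem.Set.update_nil_left, pvFmt]

-- first pair of enumerate whose value is v sits at the first index of v
theorem pvFind_enumerate (xs : List Int) (s v : Int) :
    (PySem.List.enumerate xs s).find? (fun p => p.2 == v)
      = (PySem.List.index? xs v).map (fun k => (s + (k : Int), v)) := by
  induction xs generalizing s with
  | nil => simp [PySem.List.enumerate_nil, PySem.List.index?_eq_idxOf?]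
  | cons x xs ih =>
    rw [PySem.List.enumerate_cons]
    by_cases hxv : x = v
    · subst hxv
      rw [PySem.List.index?_cons_self, List.find?_cons_of_pos (by simp)]
      simp
    · rw [List.find?_cons_of_neg (by simp [hxv]), ih (s + 1)]
      have hidx : PySem.List.index? (x :: xs) v = (PySem.List.index? xs v).map (· + 1) :=
        PySem.List.index?_cons_of_ne _ hxv
      cases h : PySem.List.index? xs v with
      | none => rw [hidx, h]; simp
      | some k =>
        rw [hidx, h]
        simp only [Option.map_some, Option.pure_def, Option.bind_some, Option.bind_eq_bind]
        simp [Prod.ext_iff]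
        ring

-- a foldl of inserts is looked up via the last matching pair
theorem pvGet_foldl_insert (ps : List (Int × Int)) (d : PySem.Dict Int Int) (k : Int) :
    (ps.foldl (fun d p => d.insert p.1 p.2) d).get? k
      = ((ps.reverse.find? (fun p => p.1 == k)).map Prod.snd).or (d.get? k) := by
  induction ps generalizing d with
  | nil => simp
  | cons p ps ih =>
    rw [List.foldl_cons, ih, List.reverse_cons, List.find?_append]
    cases hf : ps.reverse.find? (fun p => p.1 == k) with
    | some a => simp
    | none =>
      simp only [Option.none_or, Option.map_none, List.find?_singleton]
      rw [PySem.Dict.get?_insert]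
      by_cases hk : p.1 = k
      · simp [hk]
      · simp [hk, beq_iff_eq, Ne.symm hk]

-- the countdown index range, as the reverse of the enumeration of xs (swapped into (value, index) pairs)
theorem pvRange_map_pairs (xs : List Int) :
    (PySem.List.pyRange ((xs.length : Int) - 1) (-1) (-1)).map
        (fun i => (PySem.List.pyGetD xs i 0, i))
      = ((PySem.List.enumerate xs).map Prod.swap).reverse := by
  have hr : PySem.List.pyRange ((xs.length : Int) - 1) (-1) (-1)
      = (PySem.List.pyRange 0 (xs.length : Int) 1).reverse := by
    rw [PySem.List.pyRange_neg_one_eq_reverse]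
    norm_num
  rw [hr, List.map_reverse]
  congr 1
  rw [PySem.List.enumerate_eq_map_pyRange (d := 0), List.map_map]
  rfl

-- B's first_idx dict looks up the FIRST index of each value
theorem pvFirstIdx_get? (xs : List Int) (v : Int) :
    ((PySem.List.pyRange ((xs.length : Int) - 1) (-1) (-1)).foldl
        (fun d i => d.insert (PySem.List.pyGetD xs i 0) i) PySem.Dict.empty).get? v
      = (PySem.List.index? xs v).map (fun k => (k : Int)) := by
  have hfold :
      (PySem.List.pyRange ((xs.length : Int) - 1) (-1) (-1)).foldl
        (fun d i => d.insert (PySem.List.pyGetD xs i 0) i) PySem.Dict.empty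
      = (((PySem.List.enumerate xs).map Prod.swap).reverse).foldl
          (fun d p => d.insert p.1 p.2) PySem.Dict.empty := by
    rw [← pvRange_map_pairs, List.foldl_map]
  rw [hfold, pvGet_foldl_insert, List.reverse_reverse, List.find?_map]
  have hpred : ((fun (p : Int × Int) => p.1 == v) ∘ Prod.swap) = (fun (p : Int × Int) => p.2 == v) := by
    funext p; simp
  rw [hpred, pvFind_enumerate]
  cases h : PySem.List.index? xs v with
  | none => simp
  | some k => simp

theorem pvFirstIdx_keys (xs : List Int) :
    ((PySem.List.pyRange ((xs.length : Int) - 1) (-1) (-1)).foldl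
        (fun d i => d.insert (PySem.List.pyGetD xs i 0) i) PySem.Dict.empty).keys
      = PySem.Set.ofList xs.reverse := by
  rw [PySem.Dict.keys_foldl_insert_key _ (fun i => PySem.List.pyGetD xs i 0) (fun _ i => i)]
  have hmap : (PySem.List.pyRange ((xs.length : Int) - 1) (-1) (-1)).map
      (fun i => PySem.List.pyGetD xs i 0) = xs.reverse := by
    have := congrArg (List.map Prod.fst) (pvRange_map_pairs xs)
    simpa [List.map_map, Function.comp_def, PySem.List.map_snd_enumerate] using this
  rw [hmap]
  simp [PySem.Set.update_nil_left, PySem.Dict.keys_empty]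

-- along the first-seen distinct values, first indices strictly increase
theorem pvDedup_pairwise (xs : List Int) :
    (PySem.List.dedup xs).Pairwise
      (fun a b => ∀ i j, PySem.List.index? xs a = some i → PySem.List.index? xs b = some j → i < j) := by
  induction xs using List.reverseRecOn with
  | nil => simp [PySem.List.dedup]
  | append_singleton ys x ih =>
    have hd : PySem.List.dedup (ys ++ [x]) = PySem.Set.add (PySem.List.dedup ys) x := by
      simp only [PySem.List.dedup_eq_ofList]
      exact PySem.Set.ofList_append_singleton ys x
    have hmem : ∀ a, a ∈ PySem.List.dedup ys → a ∈ ys := fun a ha =>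
      (PySem.List.mem_dedup ys a).mp ha
    have hup : ∀ a ∈ PySem.List.dedup ys, PySem.List.index? (ys ++ [x]) a = PySem.List.index? ys a :=
      fun a ha => PySem.List.index?_append_of_mem [x] (hmem a ha)
    have hys : (PySem.List.dedup ys).Pairwise
        (fun a b => ∀ i j, PySem.List.index? (ys ++ [x]) a = some i →
          PySem.List.index? (ys ++ [x]) b = some j → i < j) := by
      refine List.Pairwise.imp_of_mem ?_ ih
      intro a b ha hb hR i j hi hj
      exact hR i j (by rwa [hup a ha] at hi) (by rwa [hup b hb] at hj)
    rw [hd]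
    by_cases hx : x ∈ ys
    · rwa [PySem.Set.add_of_mem (by rwa [PySem.List.mem_dedup])]
    · rw [PySem.Set.add_of_not_mem (by rwa [PySem.List.mem_dedup])]
      refine List.pairwise_append.mpr ⟨hys, List.pairwise_singleton _ _, ?_⟩
      intro a ha b hb i j hi hj
      rw [List.mem_singleton] at hb
      subst hb
      rw [hup a ha] at hi
      have hxlen := PySem.List.index?_append_singleton_self (l := ys) (c := b) hx
      rw [hxlen] at hj
      simp only [Option.some.injEq] at hj
      obtain ⟨hk, -⟩ := PySem.List.getElem_of_index?_eq_some hi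
      omega

-- the sort by first index reproduces the first-seen distinct order
theorem pvOrder_eq (xs : List Int) :
    PySem.List.sorted
        ((PySem.List.pyRange ((xs.length : Int) - 1) (-1) (-1)).foldl
          (fun d i => d.insert (PySem.List.pyGetD xs i 0) i) PySem.Dict.empty).keys
        (fun k => ((PySem.List.pyRange ((xs.length : Int) - 1) (-1) (-1)).foldl
          (fun d i => d.insert (PySem.List.pyGetD xs i 0) i) PySem.Dict.empty).getD k 0)
        false
      = PySem.List.dedup xs := by
  apply PySem.List.sorted_eq_of_perm_of_pairwise_lt
  · rw [pvFirstIdx_keys]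
    refine (List.perm_ext_iff_of_nodup (PySem.List.nodup_dedup xs) (PySem.Set.nodup_ofList _)).mpr ?_
    intro a
    simp [PySem.Set.mem_ofList]
  · refine List.Pairwise.imp_of_mem ?_ (pvDedup_pairwise xs)
    intro a b ha hb hR
    have ha' : a ∈ xs := (PySem.List.mem_dedup xs a).mp ha
    have hb' : b ∈ xs := (PySem.List.mem_dedup xs b).mp hb
    obtain ⟨i, hi⟩ := Option.isSome_iff_exists.mp ((PySem.List.index?_isSome_iff xs a).mpr ha')
    obtain ⟨j, hj⟩ := Option.isSome_iff_exists.mp ((PySem.List.index?_isSome_iff xs b).mpr hb')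
    have hlt : i < j := hR i j hi hj
    rw [PySem.Dict.getD_eq_get?_getD, PySem.Dict.getD_eq_get?_getD,
      pvFirstIdx_get?, pvFirstIdx_get?, hi, hj]
    simpa using hlt

-- ===== VERDICT (by name: the statement is the Claim_ definition above) =====
theorem build_slitw_format_dict_spec : Claim_equal_build_slitw_format_dict := by
  intro xs _
  show build_slitw_format_dict xs = build_slitw_format_dict_alt xs
  rw [pvA_eq]
  unfold build_slitw_format_dict_alt
  dsimp only
  rw [pvOrder_eq xs]
  rfl
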